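-- pv_equiv track=rewrite | github.com/agiagoulas/page-stream-segmentation | app/routers/page_stream_segmentation.py | process_prediction_to_corresponding_pages_list
-- ===== SOURCE A (Python) =====
-- def process_prediction_to_corresponding_pages_list(y_predict):
--     seperated_documents = []
--     current_document = []
--
--     first_page = True
--     for counter, prediction in enumerate(y_predict):
--
--         if not first_page:
--             if prediction == 1:
--                 seperated_documents.append(current_document)
--                 current_document = []
--                 current_document.append("page " + str(counter))
--             elif prediction == 0:
--                 current_document.append("page " + str(counter))
--         else:
--             first_page = False
--             current_document = []
--             current_document.append("page " + str(counter))
--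
--         if counter == (len(y_predict) - 1):
--             seperated_documents.append(current_document)
--
--     return (seperated_documents)
-- ===== SOURCE B (Python) =====
-- def process_prediction_to_corresponding_pages_list(y_predict):
--     # Back-to-front pass: walk the predictions in reverse, collecting pages of the
--     # current document until its start page (prediction 1, or index 0) is reached,
--     # then emit it; everything is built reversed and flipped once at the end.
--     docs_rev = []
--     cur_rev = []
--     for i, p in reversed(list(enumerate(y_predict))[1:]):
--         if p == 1:
--             cur_rev.append("page " + str(i))
--             docs_rev.append(cur_rev[::-1])
--             cur_rev = []
--         elif p == 0:
--             cur_rev.append("page " + str(i))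
--     if y_predict:
--         cur_rev.append("page 0")
--         docs_rev.append(cur_rev[::-1])
--     return docs_rev[::-1]
-- ===== Notes on version B (the rewrite author's own statement) =====
-- stated objective: alternative
-- what changed: B builds the result back-to-front: one reverse pass collects each document's pages until its start (prediction 1, or index 0) and emits it, replacing A's forward loop with a first_page flag and a last-index check inside the loop.
import Mathlib
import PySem

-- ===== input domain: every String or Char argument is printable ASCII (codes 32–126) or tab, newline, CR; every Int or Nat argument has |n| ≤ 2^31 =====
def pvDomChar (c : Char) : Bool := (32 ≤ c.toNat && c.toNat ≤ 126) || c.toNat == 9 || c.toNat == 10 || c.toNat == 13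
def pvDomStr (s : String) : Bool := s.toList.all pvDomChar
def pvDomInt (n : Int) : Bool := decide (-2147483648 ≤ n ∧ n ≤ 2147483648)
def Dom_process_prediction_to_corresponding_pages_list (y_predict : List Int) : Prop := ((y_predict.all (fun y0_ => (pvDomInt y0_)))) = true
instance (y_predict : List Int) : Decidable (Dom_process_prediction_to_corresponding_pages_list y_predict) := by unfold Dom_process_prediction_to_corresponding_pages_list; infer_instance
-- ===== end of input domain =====

-- B builds the segmentation back-to-front (reverse pass emitting each document at
-- its start page) instead of A's forward flag-driven loop; alternative decomposition, same cost.


-- ===== PORT A =====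
-- one loop iteration of A: state (seperated_documents, current_document, first_page)
def pvStepA (n : Int) (st : List (List String) × List String × Bool) (pc : Int × Int) :
    List (List String) × List String × Bool :=
  let sep := st.1
  let cur := st.2.1
  let first := st.2.2
  let counter := pc.1
  let prediction := pc.2
  let st1 : List (List String) × List String × Bool :=
    if !first then
      if prediction = 1 then (sep ++ [cur], ["page " ++ PySem.Int.toStr counter], first)
      else if prediction = 0 then (sep, cur ++ ["page " ++ PySem.Int.toStr counter], first)
      else (sep, cur, first)
    else (sep, ["page " ++ PySem.Int.toStr counter], false)
  if counter = n - 1 then (st1.1 ++ [st1.2.1], st1.2.1, st1.2.2) else st1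

def process_prediction_to_corresponding_pages_list (y_predict : List Int) : List (List String) :=
  ((PySem.List.enumerate y_predict 0).foldl
      (pvStepA (y_predict.length : Int)) ([], [], true)).1

-- ===== PORT B =====
-- one iteration of B's reverse loop: state (docs_rev, cur_rev); `xs[::-1]` is List.reverse
def pvStepB (st : List (List String) × List String) (ip : Int × Int) :
    List (List String) × List String :=
  let docs := st.1
  let cur := st.2
  if ip.2 = 1 then ((docs ++ [(cur ++ ["page " ++ PySem.Int.toStr ip.1]).reverse]), [])
  else if ip.2 = 0 then (docs, cur ++ ["page " ++ PySem.Int.toStr ip.1])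
  else st

-- `reversed(list(enumerate(y))[1:])` = ((enumerate y 0).drop 1).reverse (exact: `[1:]` on a list is drop 1)
def process_prediction_to_corresponding_pages_list_alt (y_predict : List Int) : List (List String) :=
  let st := (((PySem.List.enumerate y_predict 0).drop 1).reverse).foldl pvStepB ([], [])
  let fin := if y_predict.isEmpty then st
             else (st.1 ++ [(st.2 ++ ["page 0"]).reverse], [])
  fin.1.reverse

-- ===== PRECONDITION & SPEC =====
def Spec_process_prediction_to_corresponding_pages_list (y_predict : List Int) (out : List (List String)) : Prop := out = process_prediction_to_corresponding_pages_list_alt y_predict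
instance (y_predict : List Int) (out : List (List String)) : Decidable (Spec_process_prediction_to_corresponding_pages_list y_predict out) := by unfold Spec_process_prediction_to_corresponding_pages_list; infer_instance

-- ===== CLAIM (what is proved, stated in full; the proofs are below) =====
def Claim_equal_process_prediction_to_corresponding_pages_list : Prop := ∀ (y_predict : List Int), Dom_process_prediction_to_corresponding_pages_list y_predict → Spec_process_prediction_to_corresponding_pages_list y_predict (process_prediction_to_corresponding_pages_list y_predict)

-- ===== LEMMAS AND PROOFS =====

-- canonical recursive splitter, the bridge between the two ports:
-- one document collects `cur` plus the pages of zeros until the next 1 (or the end)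
def pvSplit (current : List String) (i : Int) (rest : List Int) : List (List String) :=
  match rest with
  | [] => [current]
  | p :: tail =>
    if p = 1 then current :: pvSplit ["page " ++ PySem.Int.toStr i] (i + 1) tail
    else if p = 0 then pvSplit (current ++ ["page " ++ PySem.Int.toStr i]) (i + 1) tail
    else pvSplit current (i + 1) tail

-- the A-side fold over a non-empty suffix starting at index i produces, on top of the
-- already emitted documents, exactly pvSplit of that suffix
theorem pvFoldA_split (n : Int) :
    ∀ (l : List Int) (i : Int) (sep : List (List String)) (cur : List String),
      i + l.length = n → l ≠ [] →
      ((PySem.List.enumerate l i).foldl (pvStepA n) (sep, cur, false)).1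
        = sep ++ pvSplit cur i l := by
  intro l
  induction l with
  | nil => intro i sep cur _ h; exact absurd rfl h
  | cons p tail ih =>
    intro i sep cur hlen _
    rw [PySem.List.enumerate_cons]
    simp only [List.foldl_cons]
    rcases tail with _ | ⟨q, rest⟩
    · -- last element: i = n - 1
      have hi : i = n - 1 := by simp at hlen; omega
      simp only [pvStepA, pvSplit]
      rcases eq_or_ne p 1 with h1 | h1
      · simp [h1, hi]
      · rcases eq_or_ne p 0 with h0 | h0
        · simp [h0, hi]
        · simp [h0, h1, hi]
    · -- not the last element: i ≠ n - 1
      have hi : i ≠ n - 1 := by simp at hlen; omega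
      have hlen' : (i + 1) + ((q :: rest).length : Int) = n := by
        simp at hlen ⊢; omega
      have hne : q :: rest ≠ [] := by simp
      simp only [pvStepA, Bool.not_false, if_true]
      rw [if_neg hi]
      rcases eq_or_ne p 1 with h1 | h1
      · rw [if_pos h1, ih (i + 1) _ _ hlen' hne]
        simp [h1, pvSplit]
      · rcases eq_or_ne p 0 with h0 | h0
        · rw [if_neg h1, if_pos h0, ih (i + 1) _ _ hlen' hne]
          simp [h0, pvSplit]
        · rw [if_neg h1, if_neg h0, ih (i + 1) _ _ hlen' hne]
          simp [h1, h0, pvSplit]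

-- the B-side reverse fold over the suffix starting at index i computes pvSplit of
-- that suffix, with the pending document and the document list stored reversed
theorem pvFoldB_split :
    ∀ (l : List Int) (i : Int) (cur : List String),
      pvSplit cur i l
        = (cur ++ (((PySem.List.enumerate l i).reverse).foldl pvStepB ([], [])).2.reverse)
            :: (((PySem.List.enumerate l i).reverse).foldl pvStepB ([], [])).1.reverse := by
  intro l
  induction l with
  | nil => intro i cur; simp [pvSplit]
  | cons p tail ih =>
    intro i cur
    rw [PySem.List.enumerate_cons]
    simp only [List.reverse_cons, List.foldl_append, List.foldl_cons, List.foldl_nil]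
    rcases eq_or_ne p 1 with h1 | h1
    · simp only [pvSplit, h1, pvStepB]
      rw [ih (i + 1) ["page " ++ PySem.Int.toStr i]]
      simp
    · rcases eq_or_ne p 0 with h0 | h0
      · simp only [pvSplit, h0, pvStepB]
        rw [ih (i + 1) (cur ++ ["page " ++ PySem.Int.toStr i])]
        simp
      · simp only [pvSplit, pvStepB, if_neg h1, if_neg h0]
        rw [ih (i + 1) cur]

-- ===== VERDICT (by name: the statement is the Claim_ definition above) =====
theorem process_prediction_to_corresponding_pages_list_spec : Claim_equal_process_prediction_to_corresponding_pages_list := by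
  intro y _
  unfold Spec_process_prediction_to_corresponding_pages_list
  rcases y with _ | ⟨p0, rest⟩
  · decide
  · unfold process_prediction_to_corresponding_pages_list
      process_prediction_to_corresponding_pages_list_alt
    have hpg : "page " ++ PySem.Int.toStr 0 = "page 0" := by decide
    -- reduce B's side to pvSplit ["page 0"] 1 rest
    rw [PySem.List.enumerate_cons]
    simp only [List.isEmpty_cons, List.drop_succ_cons, List.drop_zero, if_false,
      Bool.false_eq_true, zero_add]
    rw [show (((PySem.List.enumerate rest 1).reverse.foldl pvStepB ([], [])).1
          ++ [(((PySem.List.enumerate rest 1).reverse.foldl pvStepB ([], [])).2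
                ++ ["page 0"]).reverse]).reverse
        = pvSplit ["page 0"] 1 rest from by
      rw [pvFoldB_split rest 1 ["page 0"]]; simp]
    -- reduce A's side to the same
    simp only [List.foldl_cons, pvStepA, Bool.not_true, Bool.false_eq_true, if_false]
    rcases rest with _ | ⟨q, tail⟩
    · simp [pvSplit, hpg]
    · have h0 : (0 : Int) ≠ ((p0 :: q :: tail).length : Int) - 1 := by
        simp; omega
      rw [if_neg h0]
      have hlen : (1 : Int) + ((q :: tail).length : Int)
          = ((p0 :: q :: tail).length : Int) := by simp; omega
      rw [pvFoldA_split _ _ _ _ _ hlen (by simp)]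
      simp [hpg]
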